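-- pv_equiv track=rewrite | github.com/NexMirror/Kallithea | kallithea/lib/utils2.py | uri_filter
-- ===== SOURCE A (Python) =====
-- def uri_filter(uri):
--     """
--     Removes user:password from given url string
--
--     :param uri:
--     :rtype: unicode
--     :returns: filtered list of strings
--     """
--     if not uri:
--         return ''
--
--     proto = ''
--
--     for pat in ('https://', 'http://', 'git://'):
--         if uri.startswith(pat):
--             uri = uri[len(pat):]
--             proto = pat
--             break
--
--     # remove passwords and username
--     uri = uri[uri.find('@') + 1:]
--
--     # get the port
--     cred_pos = uri.find(':')
--     if cred_pos == -1:
--         host, port = uri, None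
--     else:
--         host, port = uri[:cred_pos], uri[cred_pos + 1:]
--
--     return filter(None, [proto, host, port])
-- ===== SOURCE B (Python) =====
-- def uri_filter(uri):
--     """Single forward pass: a character automaton over the proto-stripped string
--     (reset accumulators at the first '@', switch to the port accumulator at the
--     first ':'), with the protocol recognised by partitioning at '://'."""
--     if not uri:
--         return ''
--     head, sep, tail = uri.partition('://')
--     if sep and head in ('https', 'http', 'git'):
--         proto, rest = head + sep, tail
--     else:
--         proto, rest = '', uri
--     host, port, seen_at = [], None, False
--     for ch in rest:
--         if ch == '@' and not seen_at:
--             host, port, seen_at = [], None, True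
--         elif ch == ':' and port is None:
--             port = []
--         elif port is None:
--             host.append(ch)
--         else:
--             port.append(ch)
--     return filter(None, [proto, ''.join(host), None if port is None else ''.join(port)])
-- ===== Notes on version B (the rewrite author's own statement) =====
-- stated objective: alternative
-- what changed: Replaces A's prefix-trial loop and the two find()+slice passes by a partition at '://' plus one forward character-automaton pass that builds host/port accumulators, resetting them at the first '@' and switching to the port accumulator at the first ':'.
-- outside the precondition, e.g. on uri_filter(''): A returns '', B returns ''
import Mathlib
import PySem

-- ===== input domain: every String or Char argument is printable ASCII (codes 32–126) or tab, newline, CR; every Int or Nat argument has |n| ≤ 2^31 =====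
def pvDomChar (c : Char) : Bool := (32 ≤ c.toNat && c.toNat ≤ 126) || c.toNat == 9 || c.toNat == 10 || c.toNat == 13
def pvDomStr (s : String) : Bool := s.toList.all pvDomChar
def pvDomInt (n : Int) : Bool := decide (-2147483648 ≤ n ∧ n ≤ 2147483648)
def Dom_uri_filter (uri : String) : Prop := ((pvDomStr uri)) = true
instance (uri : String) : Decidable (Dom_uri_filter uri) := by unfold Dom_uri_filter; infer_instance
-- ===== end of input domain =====

-- B replaces A's prefix-trial loop and two find()+slice passes by a partition at '://' plus a
-- single forward character-automaton pass (reset at the first '@', port mode after the first ':');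
-- alternative decomposition, same cost. (Both Pythons return a lazy `filter` object; equivalence
-- is about the yielded values, the List String of the type convention.)

-- ===== PORT A =====
-- filter(None, [...]) on a list of str-or-None: keep the truthy (non-None, non-empty) strings
def pvTruthy (l : List (Option String)) : List String :=
  l.filterMap (fun o => match o with
    | none => none
    | some s => if s = "" then none else some s)

-- the for-loop over ('https://', 'http://', 'git://') with break: returns (uri after strip, proto)
def protoLoop (uri : String) : List String → String × String
  | [] => (uri, "")
  | p :: ps =>
      if PySem.Str.startswith uri p then (PySem.Str.slice uri (some (PySem.Str.len p)) none, p)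
      else protoLoop uri ps

def uri_filter (uri : String) : List String :=
  if uri = "" then []   -- A returns the *string* '' here, not a list; excluded by Pre_uri_filter
  else
    let up := protoLoop uri ["https://", "http://", "git://"]
    let uri2 := PySem.Str.slice up.1 (some (PySem.Str.find up.1 "@" + 1)) none
    let credPos := PySem.Str.find uri2 ":"
    let hp : String × Option String :=
      if credPos = -1 then (uri2, none)
      else (PySem.Str.slice uri2 none (some credPos),
            some (PySem.Str.slice uri2 (some (credPos + 1)) none))
    pvTruthy [some up.2, some hp.1, hp.2]

-- ===== PORT B =====
-- the body of B's for loop: state = (reversed host chars, optional reversed port chars, seen_at)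
def pvStep (st : List Char × Option (List Char) × Bool) (c : Char) :
    List Char × Option (List Char) × Bool :=
  if c = '@' ∧ st.2.2 = false then ([], none, true)
  else if c = ':' ∧ st.2.1 = none then (st.1, some [], st.2.2)
  else
    match st.2.1 with
    | none => (c :: st.1, none, st.2.2)
    | some p => (st.1, some (c :: p), st.2.2)

def uri_filter_alt (uri : String) : List String :=
  if uri = "" then []   -- B returns the string '' here too; excluded by Pre_uri_filter
  else
    -- uri.partition('://') ported by hand as find + two slices (exact: partition cuts at the
    -- first occurrence of the separator, which is what find points at)
    let i := PySem.Str.find uri "://"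
    let pr : String × String :=
      if i ≠ -1 ∧ (PySem.Str.slice uri none (some i) = "https" ∨
                   PySem.Str.slice uri none (some i) = "http" ∨
                   PySem.Str.slice uri none (some i) = "git")
      then (PySem.Str.slice uri none (some i) ++ "://", PySem.Str.slice uri (some (i + 3)) none)
      else ("", uri)
    let st := pr.2.toList.foldl pvStep ([], none, false)
    -- filter(None, [proto, host, port]) drops the None entry and the empty strings
    ([pr.1, String.ofList st.1.reverse] ++
       (match st.2.1 with
        | none => []
        | some p => [String.ofList p.reverse])).filter (fun s => decide (s ≠ ""))

-- ===== PRECONDITION & SPEC =====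
-- Pre_ excludes only the empty string, on which both Pythons return '' (a str, not a list of strings).
def Pre_uri_filter (uri : String) : Prop := uri ≠ ""
instance (uri : String) : Decidable (Pre_uri_filter uri) := by unfold Pre_uri_filter; infer_instance
def pvWitness_uri_filter : String := "http://user:pw@host:80/p"

def Spec_uri_filter (uri : String) (out : List String) : Prop := out = uri_filter_alt uri
instance (uri : String) (out : List String) : Decidable (Spec_uri_filter uri out) := by unfold Spec_uri_filter; infer_instance

-- ===== CLAIM (what is proved, stated in full; the proofs are below) =====
def Claim_equal_uri_filter : Prop := ∀ (uri : String), Dom_uri_filter uri → Pre_uri_filter uri → Spec_uri_filter uri (uri_filter uri)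

-- ===== LEMMAS AND PROOFS =====

-- find.go at offset k is the offset-0 result shifted by k
theorem pvFindGoShift (sub l : List Char) (k : Nat) :
    PySem.Chars.find.go sub l k =
      if PySem.Chars.find.go sub l 0 = -1 then -1 else PySem.Chars.find.go sub l 0 + k := by
  induction l generalizing k with
  | nil => simp [PySem.Chars.find.go]; split <;> simp
  | cons c t ih =>
    rw [PySem.Chars.find.go, PySem.Chars.find.go]
    by_cases hp : sub.isPrefixOf (c :: t)
    · simp [hp]
    · have hge : -1 ≤ PySem.Chars.find.go sub t 0 := PySem.Chars.neg_one_le_find t sub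
      simp only [hp, Bool.false_eq_true, if_false]
      rw [ih, ih 1]
      split <;> simp <;> omega

theorem pvFindCons (sep : List Char) (c : Char) (t : List Char)
    (h : sep.isPrefixOf (c :: t) = false) :
    PySem.Chars.find (c :: t) sep =
      if PySem.Chars.find t sep = -1 then -1 else PySem.Chars.find t sep + 1 := by
  unfold PySem.Chars.find
  rw [PySem.Chars.find.go]
  simp only [h, Bool.false_eq_true, if_false]
  exact pvFindGoShift sep t 1

-- find of a single character is the length of the takeWhile-(≠ c) prefix
theorem pvFindChar (l : List Char) (c : Char) :
    PySem.Chars.find l [c] =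
      if c ∈ l then ((l.takeWhile (· ≠ c)).length : Int) else -1 := by
  induction l with
  | nil => simp [PySem.Chars.find, PySem.Chars.find.go]
  | cons x t ih =>
    by_cases hx : x = c
    · subst hx
      have : PySem.Chars.find (x :: t) [x] = 0 := by
        unfold PySem.Chars.find
        rw [PySem.Chars.find.go]
        simp [List.isPrefixOf]
      simp [this, List.takeWhile]
    · have hpre : ([c].isPrefixOf (x :: t)) = false := by
        simp [List.isPrefixOf]
        exact fun h => absurd h.symm hx
      rw [pvFindCons [c] x t hpre, ih]
      have hcx : ¬ c = x := fun h => hx h.symm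
      by_cases hm : c ∈ t
      · rw [if_pos hm, if_pos (List.mem_cons_of_mem x hm),
          List.takeWhile_cons_of_pos (by simpa using hx), List.length_cons]
        push_cast
        ring
      · simp [hm, hx, hcx]

-- the automaton once the port accumulator is active: every char is appended to the port
theorem pvFoldPort (l : List Char) (h p : List Char) (s : Bool)
    (hs : s = true ∨ '@' ∉ l) :
    l.foldl pvStep (h, some p, s) = (h, some (l.reverse ++ p), s) := by
  induction l generalizing p with
  | nil => simp
  | cons c t ih =>
    have hc : ¬ (c = '@' ∧ s = false) := by
      rcases hs with hs | hs
      · simp [hs]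
      · intro ⟨hc, _⟩; exact hs (hc ▸ List.mem_cons_self)
    have ht : s = true ∨ '@' ∉ t := by
      rcases hs with hs | hs
      · exact Or.inl hs
      · exact Or.inr (fun h' => hs (List.mem_cons_of_mem _ h'))
    rw [List.foldl_cons]
    show List.foldl pvStep (pvStep (h, some p, s) c) t = _
    rw [show pvStep (h, some p, s) c = (h, some (c :: p), s) by
      simp [pvStep, hc]]
    rw [ih (c :: p) ht]
    simp

-- the automaton from a no-port state, on input without a (resetting) '@'
theorem pvFoldMain (l : List Char) (h : List Char) (s : Bool)
    (hs : s = true ∨ '@' ∉ l) :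
    l.foldl pvStep (h, none, s) =
      ((l.takeWhile (· ≠ ':')).reverse ++ h,
       (match l.dropWhile (· ≠ ':') with
        | [] => none
        | _ :: r => some r.reverse), s) := by
  induction l generalizing h with
  | nil => simp
  | cons c t ih =>
    have hc : ¬ (c = '@' ∧ s = false) := by
      rcases hs with hs | hs
      · simp [hs]
      · intro ⟨hc, _⟩; exact hs (hc ▸ List.mem_cons_self)
    have ht : s = true ∨ '@' ∉ t := by
      rcases hs with hs | hs
      · exact Or.inl hs
      · exact Or.inr (fun h' => hs (List.mem_cons_of_mem _ h'))
    rw [List.foldl_cons]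
    by_cases hcol : c = ':'
    · subst hcol
      show List.foldl pvStep (pvStep (h, none, s) ':') t = _
      rw [show pvStep (h, none, s) ':' = (h, some [], s) by simp [pvStep, hc]]
      rw [pvFoldPort t h [] s ht]
      simp [List.takeWhile, List.dropWhile]
    · show List.foldl pvStep (pvStep (h, none, s) c) t = _
      rw [show pvStep (h, none, s) c = (c :: h, none, s) by simp [pvStep, hc, hcol]]
      rw [ih (c :: h) ht]
      simp [List.takeWhile, List.dropWhile, hcol]

-- a char other than '@' never changes seen_at
theorem pvStepSeen (st : List Char × Option (List Char) × Bool) (c : Char) (hc : c ≠ '@') :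
    (pvStep st c).2.2 = st.2.2 := by
  simp only [pvStep, hc, false_and, if_false]
  split
  · rfl
  · cases st.2.1 <;> simp

-- the automaton resets at the first '@' of the input
theorem pvFoldReset (l : List Char) (st : List Char × Option (List Char) × Bool)
    (hseen : st.2.2 = false) (hmem : '@' ∈ l) :
    l.foldl pvStep st = ((l.dropWhile (· ≠ '@')).tail).foldl pvStep ([], none, true) := by
  induction l generalizing st with
  | nil => cases hmem
  | cons c t ih =>
    rw [List.foldl_cons]
    by_cases hc : c = '@'
    · subst hc
      rw [show pvStep st '@' = ([], none, true) by simp [pvStep, hseen]]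
      simp [List.dropWhile]
    · have hmt : '@' ∈ t := by
        cases hmem with
        | head => exact absurd rfl hc
        | tail _ h => exact h
      rw [ih (pvStep st c) (by rw [pvStepSeen st c hc]; exact hseen) hmt]
      simp [List.dropWhile, hc]

-- pvTruthy on all-some entries is a plain filter of the nonempty strings
theorem pvTruthyFilter (xs : List String) :
    pvTruthy (xs.map Option.some) = xs.filter (fun s => decide (s ≠ "")) := by
  induction xs with
  | nil => rfl
  | cons x t ih =>
    by_cases hx : x = "" <;> simp [pvTruthy, List.filter_cons, hx] <;>
      simpa [pvTruthy] using ih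

-- dropping the takeWhile prefix leaves the dropWhile suffix
theorem pvDropLenTakeWhile {a : Type} (p : a → Bool) (l : List a) :
    l.drop (l.takeWhile p).length = l.dropWhile p := by
  induction l with
  | nil => rfl
  | cons x t ih =>
    by_cases hx : p x <;>
      simp [List.takeWhile_cons, List.dropWhile_cons, hx, ih]

-- A's '@' cut as a takeWhile/dropWhile characterization
theorem pvAtString (u : String) :
    PySem.Str.slice u (some (PySem.Str.find u "@" + 1)) none =
      String.ofList (if '@' ∈ u.toList then (u.toList.dropWhile (· ≠ '@')).tail
                     else u.toList) := by
  apply String.toList_inj.mp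
  rw [String.toList_ofList, PySem.Str.toList_slice, PySem.Chars.slice_eq_listSlice]
  rw [show PySem.Str.find u "@" = PySem.Chars.find u.toList ['@'] from PySem.Str.find_eq u "@"]
  rw [pvFindChar]
  by_cases hat : '@' ∈ u.toList
  · rw [if_pos hat, if_pos hat]
    rw [show ((u.toList.takeWhile (· ≠ '@')).length : Int) + 1 =
          (((u.toList.takeWhile (· ≠ '@')).length + 1 : Nat) : Int) by push_cast; ring]
    rw [PySem.List.slice_from_natCast, ← List.tail_drop, pvDropLenTakeWhile]
  · rw [if_neg hat, if_neg hat]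
    norm_num [PySem.List.slice_none_none]

-- A's ':' cut + filter(None, ·) in takeWhile/dropWhile form
theorem pvTail2 (p v : String) :
    pvTruthy [some p,
      some (if PySem.Str.find v ":" = -1
            then (v, (none : Option String))
            else (PySem.Str.slice v none (some (PySem.Str.find v ":")),
                  some (PySem.Str.slice v (some (PySem.Str.find v ":" + 1)) none))).1,
      (if PySem.Str.find v ":" = -1
            then (v, (none : Option String))
            else (PySem.Str.slice v none (some (PySem.Str.find v ":")),
                  some (PySem.Str.slice v (some (PySem.Str.find v ":" + 1)) none))).2]
    = ([p, String.ofList (v.toList.takeWhile (· ≠ ':'))] ++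
        (match v.toList.dropWhile (· ≠ ':') with
         | [] => []
         | _ :: r => [String.ofList r])).filter (fun s => decide (s ≠ "")) := by
  rw [show PySem.Str.find v ":" = PySem.Chars.find v.toList [':'] from PySem.Str.find_eq v ":"]
  rw [pvFindChar]
  by_cases hc : ':' ∈ v.toList
  · have hne : v.toList.dropWhile (· ≠ ':') ≠ [] := by
      intro h
      have := List.dropWhile_eq_nil_iff.mp h ':' hc
      simp at this
    obtain ⟨d, r, hdr⟩ : ∃ d r, v.toList.dropWhile (· ≠ ':') = d :: r := by
      cases h : v.toList.dropWhile (· ≠ ':') with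
      | nil => exact absurd h hne
      | cons d r => exact ⟨d, r, rfl⟩
    rw [if_pos hc, if_neg (by omega : ¬ ((((v.toList.takeWhile (· ≠ ':')).length : Nat) : Int) = -1))]
    have hhost : PySem.Str.slice v none (some ((v.toList.takeWhile (· ≠ ':')).length : Int)) =
        String.ofList (v.toList.takeWhile (· ≠ ':')) := by
      apply String.toList_inj.mp
      rw [String.toList_ofList, PySem.Str.toList_slice, PySem.Chars.slice_eq_listSlice,
        PySem.List.slice_to_natCast]
      exact (List.prefix_iff_eq_take.mp (List.takeWhile_prefix _)).symm
    have hport : PySem.Str.slice v (some (((v.toList.takeWhile (· ≠ ':')).length : Int) + 1)) none =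
        String.ofList r := by
      apply String.toList_inj.mp
      rw [String.toList_ofList, PySem.Str.toList_slice, PySem.Chars.slice_eq_listSlice]
      rw [show ((v.toList.takeWhile (· ≠ ':')).length : Int) + 1 =
            (((v.toList.takeWhile (· ≠ ':')).length + 1 : Nat) : Int) by push_cast; ring]
      rw [PySem.List.slice_from_natCast, ← List.tail_drop, pvDropLenTakeWhile, hdr]
      rfl
    rw [hhost, hport, hdr]
    exact pvTruthyFilter [p, String.ofList (v.toList.takeWhile (· ≠ ':')), String.ofList r]
  · have hdw : v.toList.dropWhile (· ≠ ':') = [] := by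
      rw [List.dropWhile_eq_nil_iff]
      intro x hx
      simp only [ne_eq, decide_eq_true_eq]
      intro h
      exact hc (h ▸ hx)
    have htw : v.toList.takeWhile (· ≠ ':') = v.toList := by
      conv_rhs => rw [← List.takeWhile_append_dropWhile (p := fun c => decide (c ≠ ':')) (l := v.toList)]
      rw [hdw, List.append_nil]
    rw [if_neg hc, if_pos rfl, hdw, htw, String.ofList_toList]
    exact pvTruthyFilter [p, v]

-- the common tail: for any proto p and stripped uri u, A's '@'/':' cuts + filter(None, ·)
-- agree with B's single automaton pass + filter
theorem pvMainTail (p u : String) :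
    pvTruthy [some p,
      some (if PySem.Str.find (PySem.Str.slice u (some (PySem.Str.find u "@" + 1)) none) ":" = -1
            then (PySem.Str.slice u (some (PySem.Str.find u "@" + 1)) none, (none : Option String))
            else (PySem.Str.slice (PySem.Str.slice u (some (PySem.Str.find u "@" + 1)) none) none
                    (some (PySem.Str.find (PySem.Str.slice u (some (PySem.Str.find u "@" + 1)) none) ":")),
                  some (PySem.Str.slice (PySem.Str.slice u (some (PySem.Str.find u "@" + 1)) none)
                    (some (PySem.Str.find (PySem.Str.slice u (some (PySem.Str.find u "@" + 1)) none) ":" + 1)) none))).1,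
      (if PySem.Str.find (PySem.Str.slice u (some (PySem.Str.find u "@" + 1)) none) ":" = -1
            then (PySem.Str.slice u (some (PySem.Str.find u "@" + 1)) none, (none : Option String))
            else (PySem.Str.slice (PySem.Str.slice u (some (PySem.Str.find u "@" + 1)) none) none
                    (some (PySem.Str.find (PySem.Str.slice u (some (PySem.Str.find u "@" + 1)) none) ":")),
                  some (PySem.Str.slice (PySem.Str.slice u (some (PySem.Str.find u "@" + 1)) none)
                    (some (PySem.Str.find (PySem.Str.slice u (some (PySem.Str.find u "@" + 1)) none) ":" + 1)) none))).2]
    = ([p, String.ofList (u.toList.foldl pvStep ([], none, false)).1.reverse] ++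
        (match (u.toList.foldl pvStep ([], none, false)).2.1 with
         | none => []
         | some q => [String.ofList q.reverse])).filter (fun s => decide (s ≠ "")) := by
  rw [pvAtString u]
  by_cases hat : '@' ∈ u.toList
  · rw [if_pos hat, pvFoldReset u.toList ([], none, false) rfl hat,
      pvFoldMain _ [] true (Or.inl rfl)]
    have h2 := pvTail2 p (String.ofList ((u.toList.dropWhile (· ≠ '@')).tail))
    rw [String.toList_ofList] at h2
    rw [h2]
    cases hdw : ((u.toList.dropWhile (· ≠ '@')).tail).dropWhile (· ≠ ':') <;> simp [hdw]
  · rw [if_neg hat, pvFoldMain _ [] false (Or.inr hat)]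
    have h2 := pvTail2 p (String.ofList u.toList)
    rw [String.toList_ofList] at h2
    rw [h2]
    cases hdw : u.toList.dropWhile (· ≠ ':') <;> simp [hdw]

-- the first "://" of a string starting with one of the three protocols sits right after the name
theorem pvFindHttps (u : List Char) :
    PySem.Chars.find ('h' :: 't' :: 't' :: 'p' :: 's' :: ':' :: '/' :: '/' :: u) [':', '/', '/'] = 5 := by
  unfold PySem.Chars.find
  simp [PySem.Chars.find.go, List.isPrefixOf]

theorem pvFindHttp (u : List Char) :
    PySem.Chars.find ('h' :: 't' :: 't' :: 'p' :: ':' :: '/' :: '/' :: u) [':', '/', '/'] = 4 := by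
  unfold PySem.Chars.find
  simp [PySem.Chars.find.go, List.isPrefixOf]

theorem pvFindGit (u : List Char) :
    PySem.Chars.find ('g' :: 'i' :: 't' :: ':' :: '/' :: '/' :: u) [':', '/', '/'] = 3 := by
  unfold PySem.Chars.find
  simp [PySem.Chars.find.go, List.isPrefixOf]

-- B's head test: take i of the uri when it starts with the protocol literal
theorem pvHeadSlice (uri : String) (i : Int) (hi : 0 ≤ i) (w : String)
    (h : List.take i.toNat uri.toList = w.toList) :
    PySem.Str.slice uri none (some i) = w := by
  apply String.toList_inj.mp
  rw [PySem.Str.toList_slice, PySem.Chars.slice_eq_listSlice, PySem.List.slice_to _ hi, h]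

-- if the part before the first "://" is a protocol name, the uri starts with that protocol
theorem pvNoProtoAux (uri : String) (w : String)
    (hne : PySem.Str.find uri "://" ≠ -1)
    (hh : PySem.Str.slice uri none (some (PySem.Str.find uri "://")) = w) :
    PySem.Str.startswith uri (w ++ "://") = true := by
  have hfe : PySem.Str.find uri "://" = PySem.Chars.find uri.toList "://".toList :=
    PySem.Str.find_eq uri "://"
  have h0 : 0 ≤ PySem.Chars.find uri.toList "://".toList := by
    have := PySem.Chars.neg_one_le_find uri.toList "://".toList
    rw [hfe] at hne
    omega
  obtain ⟨hp, -⟩ := PySem.Chars.find_spec h0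
  obtain ⟨r, hr⟩ := hp
  have htake : List.take (PySem.Chars.find uri.toList "://".toList).toNat uri.toList = w.toList := by
    have := congrArg String.toList hh
    rw [PySem.Str.toList_slice, PySem.Chars.slice_eq_listSlice, hfe,
      PySem.List.slice_to _ h0] at this
    exact this
  rw [PySem.Str.startswith_eq]
  rw [PySem.Chars.startswith_iff]
  refine ⟨r, ?_⟩
  calc (w ++ "://").toList ++ r = w.toList ++ ("://".toList ++ r) := by
        simp [List.append_assoc]
    _ = List.take (PySem.Chars.find uri.toList "://".toList).toNat uri.toList ++
          List.drop (PySem.Chars.find uri.toList "://".toList).toNat uri.toList := by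
        rw [htake, hr]
    _ = uri.toList := List.take_append_drop _ _

-- ===== VERDICT (by name: the statement is the Claim_ definition above) =====
set_option maxHeartbeats 2000000 in
theorem uri_filter_spec : Claim_equal_uri_filter := by
  intro uri _ hpre
  show uri_filter uri = uri_filter_alt uri
  simp only [uri_filter, uri_filter_alt, protoLoop]
  rw [if_neg hpre, if_neg hpre]
  cases hb1 : PySem.Str.startswith uri "https://" with
  | true =>
    obtain ⟨r, hr⟩ : ∃ r, "https://".toList ++ r = uri.toList :=
      (PySem.Chars.startswith_iff uri.toList "https://".toList).mp
        (by rw [← PySem.Str.startswith_eq]; exact hb1)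
    have hfind : PySem.Str.find uri "://" = 5 := by
      rw [PySem.Str.find_eq, ← hr]
      exact pvFindHttps r
    have hhead : PySem.Str.slice uri none (some (5 : Int)) = "https" :=
      pvHeadSlice uri 5 (by norm_num) "https" (by rw [← hr]; rfl)
    rw [if_pos rfl, hfind,
      if_pos (⟨by norm_num, Or.inl hhead⟩ :
        (5 : Int) ≠ -1 ∧ (PySem.Str.slice uri none (some (5 : Int)) = "https" ∨
          PySem.Str.slice uri none (some (5 : Int)) = "http" ∨
          PySem.Str.slice uri none (some (5 : Int)) = "git")),
      hhead]
    rw [show ((5 : Int) + 3) = (8 : Int) by norm_num,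
      show PySem.Str.len "https://" = (8 : Int) from rfl]
    exact pvMainTail "https://" (PySem.Str.slice uri (some (8 : Int)) none)
  | false =>
    rw [if_neg (show ¬ (false = true) by decide)]
    cases hb2 : PySem.Str.startswith uri "http://" with
    | true =>
      obtain ⟨r, hr⟩ : ∃ r, "http://".toList ++ r = uri.toList :=
        (PySem.Chars.startswith_iff uri.toList "http://".toList).mp
          (by rw [← PySem.Str.startswith_eq]; exact hb2)
      have hfind : PySem.Str.find uri "://" = 4 := by
        rw [PySem.Str.find_eq, ← hr]
        exact pvFindHttp r
      have hhead : PySem.Str.slice uri none (some (4 : Int)) = "http" :=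
        pvHeadSlice uri 4 (by norm_num) "http" (by rw [← hr]; rfl)
      rw [if_pos rfl, hfind,
        if_pos (⟨by norm_num, Or.inr (Or.inl hhead)⟩ :
          (4 : Int) ≠ -1 ∧ (PySem.Str.slice uri none (some (4 : Int)) = "https" ∨
            PySem.Str.slice uri none (some (4 : Int)) = "http" ∨
            PySem.Str.slice uri none (some (4 : Int)) = "git")),
        hhead]
      rw [show ((4 : Int) + 3) = (7 : Int) by norm_num,
        show PySem.Str.len "http://" = (7 : Int) from rfl]
      exact pvMainTail "http://" (PySem.Str.slice uri (some (7 : Int)) none)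
    | false =>
      rw [if_neg (show ¬ (false = true) by decide)]
      cases hb3 : PySem.Str.startswith uri "git://" with
      | true =>
        obtain ⟨r, hr⟩ : ∃ r, "git://".toList ++ r = uri.toList :=
          (PySem.Chars.startswith_iff uri.toList "git://".toList).mp
            (by rw [← PySem.Str.startswith_eq]; exact hb3)
        have hfind : PySem.Str.find uri "://" = 3 := by
          rw [PySem.Str.find_eq, ← hr]
          exact pvFindGit r
        have hhead : PySem.Str.slice uri none (some (3 : Int)) = "git" :=
          pvHeadSlice uri 3 (by norm_num) "git" (by rw [← hr]; rfl)
        rw [if_pos rfl, hfind,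
          if_pos (⟨by norm_num, Or.inr (Or.inr hhead)⟩ :
            (3 : Int) ≠ -1 ∧ (PySem.Str.slice uri none (some (3 : Int)) = "https" ∨
              PySem.Str.slice uri none (some (3 : Int)) = "http" ∨
              PySem.Str.slice uri none (some (3 : Int)) = "git")),
          hhead]
        rw [show ((3 : Int) + 3) = (6 : Int) by norm_num,
          show PySem.Str.len "git://" = (6 : Int) from rfl]
        exact pvMainTail "git://" (PySem.Str.slice uri (some (6 : Int)) none)
      | false =>
        have hcond : ¬ (PySem.Str.find uri "://" ≠ -1 ∧
            (PySem.Str.slice uri none (some (PySem.Str.find uri "://")) = "https" ∨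
             PySem.Str.slice uri none (some (PySem.Str.find uri "://")) = "http" ∨
             PySem.Str.slice uri none (some (PySem.Str.find uri "://")) = "git")) := by
          rintro ⟨hne, hh | hh | hh⟩
          · have h := pvNoProtoAux uri "https" hne hh
            rw [show (("https" ++ "://" : String)) = "https://" from rfl, hb1] at h
            exact absurd h (by decide)
          · have h := pvNoProtoAux uri "http" hne hh
            rw [show (("http" ++ "://" : String)) = "http://" from rfl, hb2] at h
            exact absurd h (by decide)
          · have h := pvNoProtoAux uri "git" hne hh
            rw [show (("git" ++ "://" : String)) = "git://" from rfl, hb3] at h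
            exact absurd h (by decide)
        rw [if_neg (show ¬ (false = true) by decide), if_neg hcond]
        exact pvMainTail "" uri
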